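-- pv_equiv track=rewrite | github.com/namdongyun/Algorithm | 백준/Gold/2448. 별 찍기 － 11/별 찍기 － 11.py | solution
-- ===== SOURCE A (Python) =====
-- def solution(n):
--     if n == 3:
--         L = []
--         L.append(' ' * 2 + '*' + ' ' * 2)
--         L.append(' ' + '*' + ' ' + '*' + ' ')
--         L.append('*' * 5)
--         return L
--
--     Stars = solution(n//2)
--     L = []
--
--     for S in Stars:
--         L.append(' '*(n//2) + S + ' '*(n//2))
--     for S in Stars:
--         L.append(S + ' ' + S)
--
--     return L
-- ===== SOURCE B (Python) =====
-- def solution(n):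
--     # iterative bottom-up doubling: collect the halving chain, then grow the base triangle
--     sizes = []
--     s = n
--     while s != 3:
--         if s < 3:
--             raise ValueError("size must reduce to 3 by repeated halving")
--         sizes.append(s)
--         s //= 2
--     lines = ['  *  ', ' * * ', '*****']
--     for s in reversed(sizes):
--         half = ' ' * (s // 2)
--         lines = [half + L + half for L in lines] + [L + ' ' + L for L in lines]
--     return lines
-- ===== Notes on version B (the rewrite author's own statement) =====
-- stated objective: alternative
-- what changed: Top-down recursion on n//2 is replaced by an iterative bottom-up construction: first collect the halving chain n, n//2, ... down to 3, then grow the 3-line base triangle level by level with a fold.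
import Mathlib
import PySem

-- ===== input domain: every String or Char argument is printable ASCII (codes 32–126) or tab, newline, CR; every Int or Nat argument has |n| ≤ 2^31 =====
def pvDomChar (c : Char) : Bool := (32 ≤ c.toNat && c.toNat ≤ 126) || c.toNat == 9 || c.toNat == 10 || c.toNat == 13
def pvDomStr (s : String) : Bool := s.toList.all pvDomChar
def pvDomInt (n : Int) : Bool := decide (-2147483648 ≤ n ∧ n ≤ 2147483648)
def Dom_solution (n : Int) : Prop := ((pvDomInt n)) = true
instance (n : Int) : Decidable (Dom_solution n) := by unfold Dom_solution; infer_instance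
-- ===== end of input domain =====

-- B replaces the top-down recursion by an iterative bottom-up doubling over the collected halving chain (different decomposition, similar cost).

-- ===== PORT A =====
-- ' ' * k (Python: negative repeat gives the empty string)
def pvSpaces (k : Int) : String := String.ofList (List.replicate k.toNat ' ')

-- literal port of A's recursion; the fuel only makes the recursion total in Lean
-- (inside Dom, |n| ≤ 2^31, so on every input of Pre_solution the chain reaches 3
-- in at most 30 halvings and the fuel 40 is never exhausted — proved, not assumed)
def solAFuel : Nat → Int → List String
  | 0, _ => []
  | f+1, n =>
    if n = 3 then
      [pvSpaces 2 ++ "*" ++ pvSpaces 2,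
       " " ++ "*" ++ " " ++ "*" ++ " ",
       String.ofList (List.replicate 5 '*')]
    else
      let Stars := solAFuel f (PySem.Int.floordiv n 2)
      Stars.map (fun S => pvSpaces (PySem.Int.floordiv n 2) ++ S ++ pvSpaces (PySem.Int.floordiv n 2))
        ++ Stars.map (fun S => S ++ " " ++ S)

def solution (n : Int) : List String := solAFuel 40 n

-- ===== PORT B =====
-- the while loop collecting the halving chain (none = the Python raise / fuel exhaustion)
def pvCollect : Nat → Int → List Int → Option (List Int)
  | 0, _, _ => none
  | f+1, s, acc =>
    if s = 3 then some acc
    else if s < 3 then none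
    else pvCollect f (PySem.Int.floordiv s 2) (acc ++ [s])

-- one doubling step of size s
def pvGrow (lines : List String) (s : Int) : List String :=
  lines.map (fun L => pvSpaces (PySem.Int.floordiv s 2) ++ L ++ pvSpaces (PySem.Int.floordiv s 2))
    ++ lines.map (fun L => L ++ " " ++ L)

def solution_alt (n : Int) : List String :=
  match pvCollect 40 n [] with
  | none => []
  | some sizes => sizes.reverse.foldl pvGrow ["  *  ", " * * ", "*****"]

-- ===== PRECONDITION & SPEC =====
-- Pre_ excludes exactly the inputs on which A never returns (unbounded recursion /
-- RecursionError): A returns iff repeated halving of n hits 3, i.e. ∃ k, 3·2^k ≤ n < 4·2^k.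
-- The clause k ≤ Nat.log2 n.toNat is implied by 2^k ≤ n and only
-- bounds the existential so that it is decidable; it excludes no input.
def Pre_solution (n : Int) : Prop :=
  ∃ k : Nat, k ≤ Nat.log2 n.toNat ∧ 3 * 2 ^ k ≤ n ∧ n < 4 * 2 ^ k
instance (n : Int) : Decidable (Pre_solution n) := by unfold Pre_solution; infer_instance
def pvWitness_solution : Int := (3)

def Spec_solution (n : Int) (out : List String) : Prop := out = solution_alt n
instance (n : Int) (out : List String) : Decidable (Spec_solution n out) := by unfold Spec_solution; infer_instance

-- ===== CLAIM (what is proved, stated in full; the proofs are below) =====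
def Claim_equal_solution : Prop := ∀ (n : Int), Dom_solution n → Pre_solution n → Spec_solution n (solution n)

-- ===== LEMMAS AND PROOFS =====

theorem pvCollect_shift (g : Nat) : ∀ (s : Int) (acc : List Int),
    pvCollect g s acc = (pvCollect g s []).map (acc ++ ·) := by
  induction g with
  | zero => intro s acc; rfl
  | succ g ih =>
    intro s acc
    by_cases h3 : s = 3
    · simp [pvCollect, h3]
    · by_cases hlt : s < 3
      · simp [pvCollect, h3, hlt]
      · simp only [pvCollect, if_neg h3, if_neg hlt, List.nil_append]
        rw [ih (PySem.Int.floordiv s 2) (acc ++ [s]), ih (PySem.Int.floordiv s 2) [s]]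
        cases pvCollect g (PySem.Int.floordiv s 2) [] <;> simp

theorem pv_main : ∀ (k : Nat) (n : Int) (f g : Nat), k < f → k < g →
    3 * 2 ^ k ≤ n → n < 4 * 2 ^ k →
    ∃ sz, pvCollect g n [] = some sz ∧
      solAFuel f n = sz.reverse.foldl pvGrow ["  *  ", " * * ", "*****"] := by
  intro k
  induction k with
  | zero =>
    intro n f g hf hg hlo hhi
    have hn : n = 3 := by simp at hlo hhi; omega
    obtain ⟨f', rfl⟩ : ∃ f', f = f' + 1 := ⟨f - 1, by omega⟩
    obtain ⟨g', rfl⟩ : ∃ g', g = g' + 1 := ⟨g - 1, by omega⟩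
    refine ⟨[], by simp [pvCollect, hn], ?_⟩
    subst hn
    simp only [solAFuel, if_pos, List.reverse_nil, List.foldl_nil]
    decide
  | succ k ih =>
    intro n f g hf hg hlo hhi
    have hp : (0:Int) < 2 ^ k := by positivity
    have hn6 : (6:Int) ≤ n := by
      have : (2:Int) ^ (k+1) = 2 * 2 ^ k := by ring
      omega
    have h3 : ¬ n = 3 := by omega
    have hlt : ¬ n < 3 := by omega
    have hdiv : PySem.Int.floordiv n 2 = n / 2 :=
      PySem.Int.floordiv_eq_ediv_of_pos (by omega)
    have hlo' : 3 * 2 ^ k ≤ PySem.Int.floordiv n 2 := by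
      rw [hdiv]
      have : (2:Int) ^ (k+1) = 2 * 2 ^ k := by ring
      omega
    have hhi' : PySem.Int.floordiv n 2 < 4 * 2 ^ k := by
      rw [hdiv]
      have : (2:Int) ^ (k+1) = 2 * 2 ^ k := by ring
      omega
    obtain ⟨f', rfl⟩ : ∃ f', f = f' + 1 := ⟨f - 1, by omega⟩
    obtain ⟨g', rfl⟩ : ∃ g', g = g' + 1 := ⟨g - 1, by omega⟩
    obtain ⟨sz, hcol, hA⟩ := ih (PySem.Int.floordiv n 2) f' g' (by omega) (by omega) hlo' hhi'
    refine ⟨n :: sz, ?_, ?_⟩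
    · simp only [pvCollect, if_neg h3, if_neg hlt, List.nil_append]
      rw [pvCollect_shift, hcol]
      simp
    · simp only [solAFuel, if_neg h3, List.reverse_cons, List.foldl_append, List.foldl_cons,
        List.foldl_nil, ← hA]
      rfl

-- ===== VERDICT (by name: the statement is the Claim_ definition above) =====
theorem solution_spec : Claim_equal_solution := by
  intro n hdom hpre
  obtain ⟨k, _, hlo, hhi⟩ := hpre
  -- Dom bounds n ≤ 2^31, hence k ≤ 30 < 40: the fuel is never exhausted
  have hn : n ≤ 2147483648 := by
    have h := hdom
    unfold Dom_solution pvDomInt at h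
    exact (of_decide_eq_true h).2
  have hk : k < 40 := by
    by_contra h
    have h31 : (2:Int) ^ 31 ≤ 2 ^ k := by
      exact pow_le_pow_right₀ (by norm_num) (by omega)
    have hp : (0:Int) < 2 ^ k := by positivity
    have : (2:Int) ^ 31 = 2147483648 := by norm_num
    omega
  obtain ⟨sz, hcol, hA⟩ := pv_main k n 40 40 hk hk hlo hhi
  unfold Spec_solution solution solution_alt
  rw [hcol, hA]
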